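-- pv_equiv track=rewrite | github.com/frshdjfry/SeqLab | data/augmentation.py | has_enharmonic_conflict
-- ===== SOURCE A (Python) =====
-- def has_enharmonic_conflict(chord_progression):
--     natural_notes = {'C', 'D', 'E', 'F', 'G', 'A', 'B'}
--     sharps = {note + '#' for note in natural_notes}
--     flats = {note + 'b' for note in natural_notes}
--
--     roots = set()
--
--     for chord in chord_progression:
--         root = chord.split(':')[0]
--
--         if root in natural_notes:
--             if root + '#' in roots or root + 'b' in roots:
--                 return True
--         elif root in sharps:
--             if root[0] in roots or root[0] + 'b' in roots:
--                 return True
--         elif root in flats: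
--             if root[0] in roots or root[0] + '#' in roots:
--                 return True
--
--         roots.add(root)
--
--     return False
-- ===== SOURCE B (Python) =====
-- def has_enharmonic_conflict(chord_progression):
--     roots = {c.split(':')[0] for c in chord_progression}
--     return any(sum(f in roots for f in (n, n + '#', n + 'b')) >= 2
--                for n in ['C', 'D', 'E', 'F', 'G', 'A', 'B'])
-- ===== Notes on version B (the rewrite author's own statement) =====
-- stated objective: simpler
-- what changed: Replaces A's stateful single pass (running set of earlier roots with three per-chord category branches and early return) by a two-phase structure: build the set of distinct roots once, then scan the seven natural letters and report a conflict iff at least two of a letter's three forms (n, n#, nb) occur.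
import Mathlib
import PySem

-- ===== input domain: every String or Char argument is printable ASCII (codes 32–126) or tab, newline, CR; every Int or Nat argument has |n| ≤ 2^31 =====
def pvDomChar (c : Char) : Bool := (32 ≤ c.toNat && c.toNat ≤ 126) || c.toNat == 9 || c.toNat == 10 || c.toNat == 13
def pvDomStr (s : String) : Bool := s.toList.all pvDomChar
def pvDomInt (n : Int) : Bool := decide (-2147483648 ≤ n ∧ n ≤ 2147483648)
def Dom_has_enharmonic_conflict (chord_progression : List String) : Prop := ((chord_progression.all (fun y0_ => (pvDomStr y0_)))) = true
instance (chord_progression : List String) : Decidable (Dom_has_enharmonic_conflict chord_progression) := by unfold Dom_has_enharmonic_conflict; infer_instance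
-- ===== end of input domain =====

-- B replaces A's stateful early-return pass by: build the distinct-root set once, then scan the 7 letters ('simpler').

-- ===== PORT A =====
def pvNaturals : PySem.Set String := PySem.Set.ofList ["C", "D", "E", "F", "G", "A", "B"]
def pvSharps : PySem.Set String := PySem.Set.ofList (pvNaturals.map (fun note => note ++ "#"))
def pvFlats : PySem.Set String := PySem.Set.ofList (pvNaturals.map (fun note => note ++ "b"))

-- chord.split(':')[0]: sep ':' ≠ '' so split? is some, and the result list is never empty, so [0] is its head;
-- the defaults are never taken
def pvSplit0 (c : String) : String := ((PySem.Str.split? c ":").getD []).headD ""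

-- root[0]: evaluated only in branches where root is a two-character string, so the `.getD ""` default is never taken
def pvChar0 (s : String) : String := ((PySem.Str.pyGet? s 0).map (fun ch => String.singleton ch)).getD ""

def hecLoop (roots : PySem.Set String) : List String → Bool
  | [] => false
  | chord :: rest =>
      let root := pvSplit0 chord
      if PySem.Set.contains pvNaturals root then
        if PySem.Set.contains roots (root ++ "#") || PySem.Set.contains roots (root ++ "b") then true
        else hecLoop (PySem.Set.add roots root) rest
      else if PySem.Set.contains pvSharps root then
        if PySem.Set.contains roots (pvChar0 root) || PySem.Set.contains roots (pvChar0 root ++ "b") then true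
        else hecLoop (PySem.Set.add roots root) rest
      else if PySem.Set.contains pvFlats root then
        if PySem.Set.contains roots (pvChar0 root) || PySem.Set.contains roots (pvChar0 root ++ "#") then true
        else hecLoop (PySem.Set.add roots root) rest
      else hecLoop (PySem.Set.add roots root) rest

def has_enharmonic_conflict (chord_progression : List String) : Bool :=
  hecLoop PySem.Set.empty chord_progression

-- ===== PORT B =====
def has_enharmonic_conflict_alt (chord_progression : List String) : Bool :=
  let roots : PySem.Set String :=
    PySem.Set.ofList (chord_progression.map (fun c => ((PySem.Str.split? c ":").getD []).headD ""))
  (["C", "D", "E", "F", "G", "A", "B"] : List String).any (fun n =>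
    decide (2 ≤ ([n, n ++ "#", n ++ "b"] : List String).countP (fun f => PySem.Set.contains roots f)))

-- ===== PRECONDITION & SPEC =====
def Spec_has_enharmonic_conflict (chord_progression : List String) (out : Bool) : Prop := out = has_enharmonic_conflict_alt chord_progression
instance (chord_progression : List String) (out : Bool) : Decidable (Spec_has_enharmonic_conflict chord_progression out) := by unfold Spec_has_enharmonic_conflict; infer_instance

-- ===== CLAIM (what is proved, stated in full; the proofs are below) =====
def Claim_equal_has_enharmonic_conflict : Prop := ∀ (chord_progression : List String), Dom_has_enharmonic_conflict chord_progression → Spec_has_enharmonic_conflict chord_progression (has_enharmonic_conflict chord_progression)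

-- ===== LEMMAS AND PROOFS =====

def pvL7 : List String := ["C", "D", "E", "F", "G", "A", "B"]
def pvSharpsL : List String := ["C#", "D#", "E#", "F#", "G#", "A#", "B#"]
def pvFlatsL : List String := ["Cb", "Db", "Eb", "Fb", "Gb", "Ab", "Bb"]
def pvForms (n : String) : List String := [n, n ++ "#", n ++ "b"]
def pvBcond (S : List String) : Bool :=
  pvL7.any (fun n => decide (2 ≤ (pvForms n).countP (fun f => PySem.Set.contains S f)))

lemma alt_eq (cp : List String) :
    has_enharmonic_conflict_alt cp = pvBcond (PySem.Set.ofList (cp.map pvSplit0)) := rfl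

lemma naturals_eq : pvNaturals = pvL7 := by decide
lemma sharps_eq : pvSharps = pvSharpsL := by decide
lemma flats_eq : pvFlats = pvFlatsL := by decide

lemma l7_ne : ∀ r ∈ pvL7, r ≠ r ++ "#" ∧ r ≠ r ++ "b" := by decide

lemma forms_nodup : ∀ m ∈ pvL7, (pvForms m).Nodup := by decide

lemma forms_nat : ∀ r ∈ pvL7, ∀ m ∈ pvL7, r ∈ pvForms m →
    ∀ f ∈ pvForms m, f = r ∨ f = r ++ "#" ∨ f = r ++ "b" := by decide

lemma forms_subset : ∀ m ∈ pvL7, ∀ f ∈ pvForms m, f ∈ pvL7 ∨ f ∈ pvSharpsL ∨ f ∈ pvFlatsL := by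
  decide

lemma bcond_true_of_pair (T : List String) (n a b : String)
    (hn : n ∈ pvL7) (haf : a ∈ pvForms n) (hbf : b ∈ pvForms n) (hab : a ≠ b)
    (ha : a ∈ T) (hb : b ∈ T) : pvBcond T = true := by
  refine List.any_eq_true.mpr ⟨n, hn, ?_⟩
  refine decide_eq_true ?_
  simp only [pvForms, List.mem_cons, List.not_mem_nil, or_false] at haf hbf
  rcases haf with rfl | rfl | rfl <;> rcases hbf with rfl | rfl | rfl <;>
    simp_all [pvForms, List.countP_cons, PySem.Set.contains_eq_listContains]

lemma contains_add_of_ne (S : List String) (r f : String) (hf : f ≠ r) :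
    PySem.Set.contains (PySem.Set.add S r) f = PySem.Set.contains S f := by
  by_cases hfS : f ∈ S
  · rw [(PySem.Set.contains_iff S f).mpr hfS,
      (PySem.Set.contains_iff (PySem.Set.add S r) f).mpr
        ((PySem.Set.mem_add S r f).mpr (Or.inl hfS))]
  · have h1 : f ∉ PySem.Set.add S r := by
      intro h; rcases (PySem.Set.mem_add S r f).mp h with h | h
      · exact hfS h
      · exact hf h
    have e1 : PySem.Set.contains (PySem.Set.add S r) f = false :=
      Bool.eq_false_iff.mpr (fun h => h1 ((PySem.Set.contains_iff _ _).mp h))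
    have e2 : PySem.Set.contains S f = false :=
      Bool.eq_false_iff.mpr (fun h => hfS ((PySem.Set.contains_iff _ _).mp h))
    rw [e1, e2]

lemma countP_add_of_notmem (S : List String) (r x y z : String)
    (hx : x ≠ r) (hy : y ≠ r) (hz : z ≠ r) :
    ([x, y, z] : List String).countP (fun f => PySem.Set.contains (PySem.Set.add S r) f)
      = ([x, y, z] : List String).countP (fun f => PySem.Set.contains S f) := by
  simp only [List.countP_cons, List.countP_nil, contains_add_of_ne S r x hx,
    contains_add_of_ne S r y hy, contains_add_of_ne S r z hz]

lemma contains_add_false (S : List String) (r f : String) (hf : f ≠ r) (hfS : f ∉ S) :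
    PySem.Set.contains (PySem.Set.add S r) f = false := by
  rw [contains_add_of_ne S r f hf]
  exact Bool.eq_false_iff.mpr (fun h => hfS ((PySem.Set.contains_iff _ _).mp h))

lemma countP_add_le_one (S : List String) (r x y z : String)
    (hxy : x ≠ y) (hxz : x ≠ z) (hyz : y ≠ z)
    (hx : x ≠ r → x ∉ S) (hy : y ≠ r → y ∉ S) (hz : z ≠ r → z ∉ S) :
    ([x, y, z] : List String).countP (fun f => PySem.Set.contains (PySem.Set.add S r) f) ≤ 1 := by
  by_cases hxr : x = r
  · have hyr : y ≠ r := fun e => hxy (hxr.trans e.symm)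
    have hzr : z ≠ r := fun e => hxz (hxr.trans e.symm)
    simp only [List.countP_cons, List.countP_nil,
      contains_add_false S r y hyr (hy hyr), contains_add_false S r z hzr (hz hzr)]
    split_ifs <;> simp_all
  · by_cases hyr : y = r
    · have hzr : z ≠ r := fun e => hyz (hyr.trans e.symm)
      simp only [List.countP_cons, List.countP_nil,
        contains_add_false S r x hxr (hx hxr), contains_add_false S r z hzr (hz hzr)]
      split_ifs <;> simp_all
    · by_cases hzr : z = r
      · simp only [List.countP_cons, List.countP_nil,
          contains_add_false S r x hxr (hx hxr), contains_add_false S r y hyr (hy hyr)]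
        split_ifs <;> simp_all
      · simp only [List.countP_cons, List.countP_nil,
          contains_add_false S r x hxr (hx hxr), contains_add_false S r y hyr (hy hyr),
          contains_add_false S r z hzr (hz hzr)]
        simp

lemma bcond_add_false (S : List String) (r : String)
    (hS : pvBcond S = false)
    (hsib : ∀ m ∈ pvL7, r ∈ pvForms m → ∀ f ∈ pvForms m, f ≠ r → f ∉ S) :
    pvBcond (PySem.Set.add S r) = false := by
  have hS' := List.any_eq_false.mp hS
  refine List.any_eq_false.mpr ?_
  intro m hm
  have hlt : (pvForms m).countP (fun f => PySem.Set.contains S f) < 2 := by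
    have := hS' m hm; simp only [decide_eq_true_eq] at this; omega
  simp only [decide_eq_true_eq, not_le]
  by_cases hrm : r ∈ pvForms m
  · have hnd := forms_nodup m hm
    simp only [pvForms, List.nodup_cons, List.mem_cons, List.not_mem_nil, or_false,
      not_or, List.nodup_nil] at hnd
    have h1 := hsib m hm hrm
    simp only [pvForms] at h1 ⊢
    have := countP_add_le_one S r m (m ++ "#") (m ++ "b")
      hnd.1.1 hnd.1.2 hnd.2.1
      (fun h => h1 m (by simp) h) (fun h => h1 (m ++ "#") (by simp) h)
      (fun h => h1 (m ++ "b") (by simp) h)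
    omega
  · simp only [pvForms, List.mem_cons, List.not_mem_nil, or_false, not_or] at hrm
    simp only [pvForms] at hlt ⊢
    rw [countP_add_of_notmem S r _ _ _ (fun e => hrm.1 e.symm) (fun e => hrm.2.1 e.symm)
      (fun e => hrm.2.2 e.symm)]
    omega

lemma bcond_add_no_form (S : List String) (r : String)
    (h : ∀ m ∈ pvL7, r ∉ pvForms m) :
    pvBcond (PySem.Set.add S r) = pvBcond S := by
  unfold pvBcond
  refine PySem.List.any_congr_mem (fun m hm => ?_)
  have hrm := h m hm
  simp only [pvForms, List.mem_cons, List.not_mem_nil, or_false, not_or] at hrm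
  simp only [pvForms]
  have hc := countP_add_of_notmem S r m (m ++ "#") (m ++ "b") (fun e => hrm.1 e.symm)
    (fun e => hrm.2.1 e.symm) (fun e => hrm.2.2 e.symm)
  simp only [hc]
  rfl

lemma hsib_of (S : List String) (r s1 s2 : String)
    (hs1 : s1 ∉ S) (hs2 : s2 ∉ S)
    (hforms : ∀ m ∈ pvL7, r ∈ pvForms m → ∀ f ∈ pvForms m, f = r ∨ f = s1 ∨ f = s2) :
    ∀ m ∈ pvL7, r ∈ pvForms m → ∀ f ∈ pvForms m, f ≠ r → f ∉ S := by
  intro m hm hrm f hf hfr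
  rcases hforms m hm hrm f hf with h | h | h
  · exact absurd h hfr
  · exact h ▸ hs1
  · exact h ▸ hs2

lemma inner (S : PySem.Set String) (cs xs : List String) (r n a b : String)
    (hS : pvBcond S = false)
    (ih : ∀ S', pvBcond S' = false → hecLoop S' cs = pvBcond (PySem.Set.update S' xs))
    (hn : n ∈ pvL7) (hrf : r ∈ pvForms n) (haf : a ∈ pvForms n) (hbf : b ∈ pvForms n)
    (hra : r ≠ a) (hrb : r ≠ b)
    (hforms : ∀ m ∈ pvL7, r ∈ pvForms m → ∀ f ∈ pvForms m, f = r ∨ f = a ∨ f = b) :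
    (if PySem.Set.contains S a || PySem.Set.contains S b then true
     else hecLoop (PySem.Set.add S r) cs) = pvBcond (PySem.Set.update (PySem.Set.add S r) xs) := by
  by_cases h : (PySem.Set.contains S a || PySem.Set.contains S b) = true
  · rw [if_pos h]
    have hrT : r ∈ PySem.Set.update (PySem.Set.add S r) xs :=
      (PySem.Set.mem_update _ _ _).mpr (Or.inl ((PySem.Set.mem_add _ _ _).mpr (Or.inr rfl)))
    rcases (Bool.or_eq_true _ _).mp h with h' | h'
    · have haT : a ∈ PySem.Set.update (PySem.Set.add S r) xs :=
        (PySem.Set.mem_update _ _ _).mpr (Or.inl ((PySem.Set.mem_add _ _ _).mpr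
          (Or.inl ((PySem.Set.contains_iff _ _).mp h'))))
      exact (bcond_true_of_pair _ n r a hn hrf haf hra hrT haT).symm
    · have hbT : b ∈ PySem.Set.update (PySem.Set.add S r) xs :=
        (PySem.Set.mem_update _ _ _).mpr (Or.inl ((PySem.Set.mem_add _ _ _).mpr
          (Or.inl ((PySem.Set.contains_iff _ _).mp h'))))
      exact (bcond_true_of_pair _ n r b hn hrf hbf hrb hrT hbT).symm
  · rw [if_neg h]
    simp only [Bool.or_eq_true, not_or] at h
    have ha' : a ∉ S := fun hm => h.1 ((PySem.Set.contains_iff S a).mpr hm)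
    have hb' : b ∉ S := fun hm => h.2 ((PySem.Set.contains_iff S b).mpr hm)
    exact ih _ (bcond_add_false S r hS (hsib_of S r a b ha' hb' hforms))

lemma hecLoop_cons (S : PySem.Set String) (c : String) (cs : List String) :
    hecLoop S (c :: cs) =
      (if PySem.Set.contains pvNaturals (pvSplit0 c) then
        if PySem.Set.contains S (pvSplit0 c ++ "#") || PySem.Set.contains S (pvSplit0 c ++ "b") then true
        else hecLoop (PySem.Set.add S (pvSplit0 c)) cs
      else if PySem.Set.contains pvSharps (pvSplit0 c) then
        if PySem.Set.contains S (pvChar0 (pvSplit0 c)) || PySem.Set.contains S (pvChar0 (pvSplit0 c) ++ "b") then true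
        else hecLoop (PySem.Set.add S (pvSplit0 c)) cs
      else if PySem.Set.contains pvFlats (pvSplit0 c) then
        if PySem.Set.contains S (pvChar0 (pvSplit0 c)) || PySem.Set.contains S (pvChar0 (pvSplit0 c) ++ "#") then true
        else hecLoop (PySem.Set.add S (pvSplit0 c)) cs
      else hecLoop (PySem.Set.add S (pvSplit0 c)) cs) := rfl

lemma no_form_of (r : String) (h1 : r ∉ pvL7) (h2 : r ∉ pvSharpsL) (h3 : r ∉ pvFlatsL) :
    ∀ m ∈ pvL7, r ∉ pvForms m := by
  intro m hm hf
  rcases forms_subset m hm r hf with h | h | h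
  · exact h1 h
  · exact h2 h
  · exact h3 h

lemma hecLoop_eq (cp : List String) : ∀ S : PySem.Set String, pvBcond S = false →
    hecLoop S cp = pvBcond (PySem.Set.update S (cp.map pvSplit0)) := by
  induction cp with
  | nil =>
      intro S hS
      simpa [hecLoop, PySem.Set.update] using hS.symm
  | cons c cs ih =>
      intro S hS
      rw [List.map_cons, PySem.Set.update_cons, hecLoop_cons]
      generalize pvSplit0 c = r
      by_cases h1 : PySem.Set.contains pvNaturals r = true
      · rw [if_pos h1]
        have hr7 : r ∈ pvL7 := by
          have := (PySem.Set.contains_iff pvNaturals r).mp h1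
          rwa [naturals_eq] at this
        exact inner S cs _ r r (r ++ "#") (r ++ "b") hS ih hr7 (by simp [pvForms])
          (by simp [pvForms]) (by simp [pvForms]) (l7_ne r hr7).1 (l7_ne r hr7).2
          (forms_nat r hr7)
      · rw [if_neg h1]
        by_cases h2 : PySem.Set.contains pvSharps r = true
        · rw [if_pos h2]
          have hr : r ∈ pvSharpsL := by
            have := (PySem.Set.contains_iff pvSharps r).mp h2
            rwa [sharps_eq] at this
          simp only [pvSharpsL, List.mem_cons, List.not_mem_nil, or_false] at hr
          rcases hr with rfl | rfl | rfl | rfl | rfl | rfl | rfl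
          · rw [show pvChar0 "C#" = "C" by decide]
            exact inner S cs _ "C#" "C" "C" "Cb" hS ih (by decide) (by decide) (by decide)
              (by decide) (by decide) (by decide) (by decide)
          · rw [show pvChar0 "D#" = "D" by decide]
            exact inner S cs _ "D#" "D" "D" "Db" hS ih (by decide) (by decide) (by decide)
              (by decide) (by decide) (by decide) (by decide)
          · rw [show pvChar0 "E#" = "E" by decide]
            exact inner S cs _ "E#" "E" "E" "Eb" hS ih (by decide) (by decide) (by decide)
              (by decide) (by decide) (by decide) (by decide)
          · rw [show pvChar0 "F#" = "F" by decide]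
            exact inner S cs _ "F#" "F" "F" "Fb" hS ih (by decide) (by decide) (by decide)
              (by decide) (by decide) (by decide) (by decide)
          · rw [show pvChar0 "G#" = "G" by decide]
            exact inner S cs _ "G#" "G" "G" "Gb" hS ih (by decide) (by decide) (by decide)
              (by decide) (by decide) (by decide) (by decide)
          · rw [show pvChar0 "A#" = "A" by decide]
            exact inner S cs _ "A#" "A" "A" "Ab" hS ih (by decide) (by decide) (by decide)
              (by decide) (by decide) (by decide) (by decide)
          · rw [show pvChar0 "B#" = "B" by decide]
            exact inner S cs _ "B#" "B" "B" "Bb" hS ih (by decide) (by decide) (by decide)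
              (by decide) (by decide) (by decide) (by decide)
        · rw [if_neg h2]
          by_cases h3 : PySem.Set.contains pvFlats r = true
          · rw [if_pos h3]
            have hr : r ∈ pvFlatsL := by
              have := (PySem.Set.contains_iff pvFlats r).mp h3
              rwa [flats_eq] at this
            simp only [pvFlatsL, List.mem_cons, List.not_mem_nil, or_false] at hr
            rcases hr with rfl | rfl | rfl | rfl | rfl | rfl | rfl
            · rw [show pvChar0 "Cb" = "C" by decide]
              exact inner S cs _ "Cb" "C" "C" "C#" hS ih (by decide) (by decide) (by decide)
                (by decide) (by decide) (by decide) (by decide)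
            · rw [show pvChar0 "Db" = "D" by decide]
              exact inner S cs _ "Db" "D" "D" "D#" hS ih (by decide) (by decide) (by decide)
                (by decide) (by decide) (by decide) (by decide)
            · rw [show pvChar0 "Eb" = "E" by decide]
              exact inner S cs _ "Eb" "E" "E" "E#" hS ih (by decide) (by decide) (by decide)
                (by decide) (by decide) (by decide) (by decide)
            · rw [show pvChar0 "Fb" = "F" by decide]
              exact inner S cs _ "Fb" "F" "F" "F#" hS ih (by decide) (by decide) (by decide)
                (by decide) (by decide) (by decide) (by decide)
            · rw [show pvChar0 "Gb" = "G" by decide]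
              exact inner S cs _ "Gb" "G" "G" "G#" hS ih (by decide) (by decide) (by decide)
                (by decide) (by decide) (by decide) (by decide)
            · rw [show pvChar0 "Ab" = "A" by decide]
              exact inner S cs _ "Ab" "A" "A" "A#" hS ih (by decide) (by decide) (by decide)
                (by decide) (by decide) (by decide) (by decide)
            · rw [show pvChar0 "Bb" = "B" by decide]
              exact inner S cs _ "Bb" "B" "B" "B#" hS ih (by decide) (by decide) (by decide)
                (by decide) (by decide) (by decide) (by decide)
          · rw [if_neg h3]
            have h1' : r ∉ pvL7 := fun hm =>
              h1 ((PySem.Set.contains_iff pvNaturals r).mpr (naturals_eq ▸ hm))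
            have h2' : r ∉ pvSharpsL := fun hm =>
              h2 ((PySem.Set.contains_iff pvSharps r).mpr (sharps_eq ▸ hm))
            have h3' : r ∉ pvFlatsL := fun hm =>
              h3 ((PySem.Set.contains_iff pvFlats r).mpr (flats_eq ▸ hm))
            refine ih _ ?_
            rw [bcond_add_no_form S r (no_form_of r h1' h2' h3')]
            exact hS

-- ===== VERDICT (by name: the statement is the Claim_ definition above) =====
theorem has_enharmonic_conflict_spec : Claim_equal_has_enharmonic_conflict := by
  intro cp _
  unfold Spec_has_enharmonic_conflict
  rw [alt_eq]
  show hecLoop PySem.Set.empty cp = _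
  rw [hecLoop_eq cp PySem.Set.empty (by decide)]
  rfl
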